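-- pv_equiv track=rewrite | github.com/rebuilder945/FL_research | ast_research/python_code_5.23/lastterm_page7/success_code/郭奇-3225-2023-05-22_21_00_57.py | work
-- ===== SOURCE A (Python) =====
-- def work(a) :
--     def j(a):
--         if a == 0:
--             return 1
--         else:
--             return a*j(a-1)
--     dic = {}
--     for i in range(a):
--          dic[i]=j(a)
--     return dic
-- ===== SOURCE B (Python) =====
-- def work(a):
--     fact = 1
--     for k in range(2, a + 1):
--         fact *= k
--     return {i: fact for i in range(a)}
-- ===== Notes on version B (the rewrite author's own statement) =====
-- stated objective: faster
-- what changed: B computes the factorial once with an iterative accumulator loop instead of calling the recursive factorial j(a) afresh for every key, then builds the dict in one comprehension.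
import Mathlib
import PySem

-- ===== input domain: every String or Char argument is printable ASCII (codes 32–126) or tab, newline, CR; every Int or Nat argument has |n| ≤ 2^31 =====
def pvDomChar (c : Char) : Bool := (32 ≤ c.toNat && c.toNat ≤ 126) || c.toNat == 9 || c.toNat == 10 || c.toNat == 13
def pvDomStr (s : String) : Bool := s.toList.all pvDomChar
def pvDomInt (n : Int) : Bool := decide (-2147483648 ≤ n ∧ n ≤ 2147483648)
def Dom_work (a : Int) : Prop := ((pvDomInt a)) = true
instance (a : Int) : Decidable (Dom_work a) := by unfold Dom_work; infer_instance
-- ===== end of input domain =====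

-- B computes a! once with an accumulator loop instead of re-running a recursive factorial for every key.

-- ===== PORT A =====
-- Python's inner j is recursive; it is only ever called with the nonnegative a of a
-- nonempty range (a ≥ 1), where this Nat recursion is exact.
def jA : Nat → Int
  | 0 => 1
  | n + 1 => ((n : Int) + 1) * jA n

def work (a : Int) : List (Int × Int) :=
  ((PySem.List.pyRange 0 a 1).foldl (fun d i => d.insert i (jA a.toNat)) PySem.Dict.empty).items

-- ===== PORT B =====
def work_alt (a : Int) : List (Int × Int) :=
  let fact := (PySem.List.pyRange 2 (a + 1) 1).foldl (fun f k => f * k) 1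
  -- dict comprehension over the distinct keys of range(a): the pairs in order
  (PySem.List.pyRange 0 a 1).map (fun i => (i, fact))

-- ===== PRECONDITION & SPEC =====
-- Pre_ excludes large a, where A's recursive factorial exceeds Python's default recursion
-- limit and raises RecursionError; the exact cut-off depends on interpreter state, so a
-- bound safely below the limit is used.
def Pre_work (a : Int) : Prop := a ≤ 990
instance (a : Int) : Decidable (Pre_work a) := by unfold Pre_work; infer_instance
def pvWitness_work : Int := (5)
def Spec_work (a : Int) (out : List (Int × Int)) : Prop := out = work_alt a
instance (a : Int) (out : List (Int × Int)) : Decidable (Spec_work a out) := by unfold Spec_work; infer_instance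

-- ===== CLAIM (what is proved, stated in full; the proofs are below) =====
def Claim_equal_work : Prop := ∀ (a : Int), Dom_work a → Pre_work a → Spec_work a (work a)

-- ===== LEMMAS AND PROOFS =====

-- the recursive factorial equals B's accumulator product over range(2, n+1)
theorem jA_eq_foldl (n : Nat) :
    jA n = (PySem.List.pyRange 2 ((n : Int) + 1) 1).foldl (fun f k => f * k) 1 := by
  induction n with
  | zero => simp [jA, PySem.List.pyRange_one_eq_nil]
  | succ m ih =>
      rcases Nat.eq_zero_or_pos m with hm | hm
      · subst hm
        simp [jA, PySem.List.pyRange_one_eq_nil]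
      · have h1 : (2 : Int) ≤ (m : Int) + 1 := by omega
        have : PySem.List.pyRange 2 (((m + 1 : Nat) : Int) + 1) 1
            = PySem.List.pyRange 2 ((m : Int) + 1) 1 ++ [(m : Int) + 1] := by
          push_cast
          rw [show ((m : Int) + 1 + 1) = ((m : Int) + 1) + 1 by ring]
          exact PySem.List.pyRange_one_succ_right h1
        rw [this, List.foldl_append]
        simp [jA, ← ih]
        ring

theorem work_eq_alt (a : Int) : work a = work_alt a := by
  unfold work work_alt
  by_cases h : a ≤ 0
  · simp [PySem.List.pyRange_one_eq_nil h, PySem.Dict.empty]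
  · rw [PySem.Dict.items_foldl_insert_fresh (PySem.List.pyRange 0 a 1)
        (fun i => i) (fun _ => jA a.toNat) PySem.Dict.empty
        (fun i _ => by simp)
        (by simpa using PySem.List.nodup_pyRange_one 0 a)]
    have ha : ((a.toNat : Int)) = a := Int.toNat_of_nonneg (by omega)
    simp [jA_eq_foldl a.toNat, ha, PySem.Dict.empty]

-- ===== VERDICT (by name: the statement is the Claim_ definition above) =====
theorem work_spec : Claim_equal_work := by
  intro a _ _
  exact work_eq_alt a
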